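-- pv_equiv track=rewrite | github.com/CorentinCLERO/concours_algo_grid | solvers/solver_dataset_3.py | build_greedy_initial_solution
-- ===== SOURCE A (Python) =====
-- from typing import Dict, List, Sequence, Tuple
--
-- Rect = Tuple[int, int, int, int, int]  # x1, y1, x2, y2, color
--
-- Grid = List[List[int]]
--
-- def build_greedy_initial_solution(target: Grid, base_color: int, color_order: Sequence[int]) -> List[Rect]:
--     h = len(target)
--     w = len(target[0])
--
--     runs_by_color: Dict[int, List[Tuple[int, int, int, int, int]]] = {}
--
--     for y, row in enumerate(target):
--         x = 0
--         while x < w: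
--             c = row[x]
--             x2 = x
--             while x2 + 1 < w and row[x2 + 1] == c:
--                 x2 += 1
--             if c != base_color:
--                 runs_by_color.setdefault(c, []).append((x, y, x2, y, c))
--             x = x2 + 1
--
--     actions: List[Rect] = [(0, 0, w - 1, h - 1, base_color)]
--
--     for c in color_order:
--         runs = runs_by_color.get(c, [])
--         runs.sort(key=lambda t: (t[0], t[2], t[1]))
--
--         current = None
--         for x1, y1, x2, y2, _ in runs:
--             if current and current[0] == x1 and current[2] == x2 and y1 == current[3] + 1:
--                 current = (current[0], current[1], current[2], y2, c)
--             else: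
--                 if current is not None:
--                     actions.append(current)
--                 current = (x1, y1, x2, y2, c)
--
--         if current is not None:
--             actions.append(current)
--
--     return actions
-- ===== SOURCE B (Python) =====
-- def build_greedy_initial_solution(target, base_color, color_order):
--     h = len(target)
--     w = len(target[0])
--
--     def is_run(y, x1, x2, c):
--         # row y exists and has a maximal horizontal run of color c exactly [x1, x2]
--         if y < 0 or y >= h:
--             return False
--         row = target[y]
--         if any(row[x] != c for x in range(x1, x2 + 1)):
--             return False
--         if x1 > 0 and row[x1 - 1] == c:
--             return False
--         if x2 + 1 < w and row[x2 + 1] == c: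
--             return False
--         return True
--
--     actions = [(0, 0, w - 1, h - 1, base_color)]
--
--     for c in color_order:
--         rects = []
--         if c != base_color:
--             for y in range(h):
--                 row = target[y]
--                 x = 0
--                 while x < w:
--                     if row[x] != c:
--                         x += 1
--                         continue
--                     x2 = x
--                     while x2 + 1 < w and row[x2 + 1] == c:
--                         x2 += 1
--                     # [x, x2] is a maximal run of c; it is a rectangle top edge
--                     # iff the same run is not present directly above
--                     if not is_run(y - 1, x, x2, c):
--                         y2 = y
--                         while is_run(y2 + 1, x, x2, c):
--                             y2 += 1
--                         rects.append((x, y, x2, y2, c))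
--                     x = x2 + 1
--         rects.sort(key=lambda r: (r[0], r[2], r[1]))
--         actions.extend(rects)
--
--     return actions
-- ===== Notes on version B (the rewrite author's own statement) =====
-- stated objective: alternative
-- what changed: B never collects runs into a per-color structure and has no merge accumulator: for each color it rescans the grid, detects each maximal run that is a rectangle TOP edge (the same run is absent in the row above), grows that rectangle downward while the run repeats, and sorts the finished rectangles by (x1, x2, y1) before emitting them.
-- outside the precondition, e.g. on build_greedy_initial_solution([], 0, [1]): A raises IndexError, B raises IndexError; on build_greedy_initial_solution([[1, 2], [1]], 0, [1]): A raises IndexError, B raises IndexError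
import Mathlib
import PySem

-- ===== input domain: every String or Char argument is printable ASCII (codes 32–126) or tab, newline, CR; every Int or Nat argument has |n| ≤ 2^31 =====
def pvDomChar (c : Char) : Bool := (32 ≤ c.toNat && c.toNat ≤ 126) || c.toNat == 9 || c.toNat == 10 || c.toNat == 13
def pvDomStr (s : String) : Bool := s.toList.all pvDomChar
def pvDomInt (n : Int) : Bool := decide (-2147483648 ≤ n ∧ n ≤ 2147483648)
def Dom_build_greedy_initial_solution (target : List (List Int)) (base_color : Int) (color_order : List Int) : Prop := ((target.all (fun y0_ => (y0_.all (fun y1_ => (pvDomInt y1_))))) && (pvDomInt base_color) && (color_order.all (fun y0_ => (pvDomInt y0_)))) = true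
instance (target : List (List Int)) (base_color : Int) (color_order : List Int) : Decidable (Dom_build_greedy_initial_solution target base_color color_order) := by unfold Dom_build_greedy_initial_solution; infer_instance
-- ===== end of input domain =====

-- B drops A's run collection and merge accumulator entirely: per color it rescans the grid,
-- detects each maximal run that is a rectangle TOP edge (same run absent in the row above),
-- grows that rectangle downward while the run repeats, and sorts the finished rectangles by
-- (x1, x2, y1) before emitting them (objective: alternative algorithm; not faster — the
-- per-color rescan costs O(|color_order|*h*w) where A scans once).

-- ===== PORT A =====
-- inner while of the row scan: 'while x2 + 1 < w and row[x2 + 1] == c: x2 += 1'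
-- (this inner while appears verbatim in both Pythons, so both ports share this helper)
def pvFindEnd (row : List Int) (w c : Int) : Int → Nat → Int
  | x2, 0 => x2
  | x2, Nat.succ f =>
    if x2 + 1 < w && PySem.List.pyGetD row (x2 + 1) 0 == c then pvFindEnd row w c (x2 + 1) f
    else x2

-- A's 'while x < w' row loop: 'runs_by_color.setdefault(c, []).append((x, y, x2, y, c))'
def pvRowA (base : Int) (row : List Int) (w y : Int) :
    Int → Nat → PySem.Dict Int (List (Int × Int × Int × Int × Int)) →
    PySem.Dict Int (List (Int × Int × Int × Int × Int))
  | _, 0, d => d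
  | x, Nat.succ f, d =>
    if x < w then
      let c := PySem.List.pyGetD row x 0
      let x2 := pvFindEnd row w c x f
      let d' := if c != base then d.modify c [] (fun v => v ++ [(x, y, x2, y, c)]) else d
      pvRowA base row w y (x2 + 1) f d'
    else d

def build_greedy_initial_solution (target : List (List Int)) (base_color : Int) (color_order : List Int) : List (Int × Int × Int × Int × Int) :=
  let h : Int := target.length
  let w : Int := (PySem.List.pyGetD target 0 []).length
  let runs_by_color : PySem.Dict Int (List (Int × Int × Int × Int × Int)) :=
    (PySem.List.enumerate target).foldl
      (fun d yr => pvRowA base_color yr.2 w yr.1 0 w.toNat d) PySem.Dict.empty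
  let actions : List (Int × Int × Int × Int × Int) := [(0, 0, w - 1, h - 1, base_color)]
  color_order.foldl (fun actions c =>
    -- runs.sort(key=lambda t: (t[0], t[2], t[1])) : Python tuple keys compare lexicographically (toLex)
    let runs := PySem.List.sorted (runs_by_color.getD c [])
      (fun t => toLex (t.1, toLex (t.2.2.1, t.2.1))) false
    let st := runs.foldl
      (fun (st : List (Int × Int × Int × Int × Int) × Option (Int × Int × Int × Int × Int)) r =>
        match st.2 with
        | some cu =>
          if cu.1 == r.1 && cu.2.2.1 == r.2.2.1 && r.2.1 == cu.2.2.2.1 + 1 then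
            (st.1, some (cu.1, cu.2.1, cu.2.2.1, r.2.2.2.1, c))
          else
            (st.1 ++ [cu], some (r.1, r.2.1, r.2.2.1, r.2.2.2.1, c))
        | none => (st.1, some (r.1, r.2.1, r.2.2.1, r.2.2.2.1, c))) (actions, none)
    match st.2 with
    | some cu => st.1 ++ [cu]
    | none => st.1) actions

-- ===== PORT B =====
-- B's 'def is_run(y, x1, x2, c)': row y exists and has a maximal run of c exactly [x1, x2]
def pvIsRunB (target : List (List Int)) (h w : Int) (y x1 x2 c : Int) : Bool :=
  if y < 0 || h ≤ y then false
  else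
    let row := PySem.List.pyGetD target y []
    if (PySem.List.pyRange x1 (x2 + 1) 1).any (fun x => PySem.List.pyGetD row x 0 != c) then false
    else if 0 < x1 && PySem.List.pyGetD row (x1 - 1) 0 == c then false
    else if x2 + 1 < w && PySem.List.pyGetD row (x2 + 1) 0 == c then false
    else true

-- B's 'while is_run(y2 + 1, x, x2, c): y2 += 1'
def pvGrow (target : List (List Int)) (h w x1 x2 c : Int) : Int → Nat → Int
  | y2, 0 => y2
  | y2, Nat.succ f =>
    if pvIsRunB target h w (y2 + 1) x1 x2 c then pvGrow target h w x1 x2 c (y2 + 1) f else y2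

-- B's 'while x < w' scan of row y, collecting the rectangles whose top edge is in row y
def pvRowScanB (target : List (List Int)) (h w c : Int) (row : List Int) (y : Int) :
    Int → Nat → List (Int × Int × Int × Int × Int) → List (Int × Int × Int × Int × Int)
  | _, 0, r => r
  | x, Nat.succ f, r =>
    if x < w then
      if PySem.List.pyGetD row x 0 != c then pvRowScanB target h w c row y (x + 1) f r
      else
        let x2 := pvFindEnd row w c x f
        let r' := if !pvIsRunB target h w (y - 1) x x2 c then
            r ++ [(x, y, x2, pvGrow target h w x x2 c y h.toNat, c)]
          else r
        pvRowScanB target h w c row y (x2 + 1) f r'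
    else r

def build_greedy_initial_solution_alt (target : List (List Int)) (base_color : Int) (color_order : List Int) : List (Int × Int × Int × Int × Int) :=
  let h : Int := target.length
  let w : Int := (PySem.List.pyGetD target 0 []).length
  let actions : List (Int × Int × Int × Int × Int) := [(0, 0, w - 1, h - 1, base_color)]
  color_order.foldl (fun actions c =>
    let rects : List (Int × Int × Int × Int × Int) :=
      if c != base_color then
        (PySem.List.pyRange 0 h 1).foldl (fun r y =>
          pvRowScanB target h w c (PySem.List.pyGetD target y []) y 0 w.toNat r) []
      else []
    -- rects.sort(key=lambda r: (r[0], r[2], r[1])); actions.extend(rects)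
    actions ++ PySem.List.sorted rects (fun t => toLex (t.1, toLex (t.2.2.1, t.2.1))) false) actions

-- ===== PRECONDITION & SPEC =====
-- Pre_ excludes exactly the inputs where Python A raises IndexError: an empty grid
-- (target[0]) and grids whose later rows are shorter than the first row (row[x], x < w).
def Pre_build_greedy_initial_solution (target : List (List Int)) (base_color : Int) (color_order : List Int) : Prop :=
  target ≠ [] ∧ ∀ row ∈ target, (PySem.List.pyGetD target 0 []).length ≤ row.length
instance (target : List (List Int)) (base_color : Int) (color_order : List Int) : Decidable (Pre_build_greedy_initial_solution target base_color color_order) := by unfold Pre_build_greedy_initial_solution; infer_instance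

def pvWitness_build_greedy_initial_solution : List (List Int) × Int × List Int :=
  ([[1, 0], [1, 1]], 0, [1])

def Spec_build_greedy_initial_solution (target : List (List Int)) (base_color : Int) (color_order : List Int) (out : List (Int × Int × Int × Int × Int)) : Prop := out = build_greedy_initial_solution_alt target base_color color_order
instance (target : List (List Int)) (base_color : Int) (color_order : List Int) (out : List (Int × Int × Int × Int × Int)) : Decidable (Spec_build_greedy_initial_solution target base_color color_order out) := by unfold Spec_build_greedy_initial_solution; infer_instance

-- ===== CLAIM (what is proved, stated in full; the proofs are below) =====
def Claim_equal_build_greedy_initial_solution : Prop := ∀ (target : List (List Int)) (base_color : Int) (color_order : List Int), Dom_build_greedy_initial_solution target base_color color_order → Pre_build_greedy_initial_solution target base_color color_order → Spec_build_greedy_initial_solution target base_color color_order (build_greedy_initial_solution target base_color color_order)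

-- ===== LEMMAS AND PROOFS =====

-- Abstract "events" of A's row scan: one entry (c, x1, x2, y) per non-base maximal
-- horizontal run, in generation order (rows top to bottom, runs left to right).
def pvRowEv (base : Int) (row : List Int) (w y : Int) : Int → Nat → List (Int × Int × Int × Int)
  | _, 0 => []
  | x, Nat.succ f =>
    if x < w then
      let c := PySem.List.pyGetD row x 0
      let x2 := pvFindEnd row w c x f
      (if c != base then [(c, x, x2, y)] else []) ++ pvRowEv base row w y (x2 + 1) f
    else []

def pvEvents (base w : Int) (l : List (Int × List Int)) : List (Int × Int × Int × Int) :=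
  l.flatMap (fun yr => pvRowEv base yr.2 w yr.1 0 w.toNat)

def pvRunOf (e : Int × Int × Int × Int) : Int × Int × Int × Int × Int :=
  (e.2.1, e.2.2.2, e.2.2.1, e.2.2.2, e.1)

def pvKey3 (e : Int × Int × Int × Int) : Int × Int × Int := (e.1, e.2.1, e.2.2.1)

def pvKeyA (t : Int × Int × Int × Int × Int) : Int ×ₗ (Int ×ₗ Int) :=
  toLex (t.1, toLex (t.2.2.1, t.2.1))

def pvUpdA (d : PySem.Dict Int (List (Int × Int × Int × Int × Int))) (e : Int × Int × Int × Int) :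
    PySem.Dict Int (List (Int × Int × Int × Int × Int)) :=
  d.modify e.1 [] (fun v => v ++ [pvRunOf e])

def pvMergeStep (c : Int)
    (st : List (Int × Int × Int × Int × Int) × Option (Int × Int × Int × Int × Int))
    (r : Int × Int × Int × Int × Int) :
    List (Int × Int × Int × Int × Int) × Option (Int × Int × Int × Int × Int) :=
  match st.2 with
  | some cu =>
    if cu.1 == r.1 && cu.2.2.1 == r.2.2.1 && r.2.1 == cu.2.2.2.1 + 1 then
      (st.1, some (cu.1, cu.2.1, cu.2.2.1, r.2.2.2.1, c))
    else
      (st.1 ++ [cu], some (r.1, r.2.1, r.2.2.1, r.2.2.2.1, c))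
  | none => (st.1, some (r.1, r.2.1, r.2.2.1, r.2.2.2.1, c))

def pvFlush (st : List (Int × Int × Int × Int × Int) × Option (Int × Int × Int × Int × Int)) :
    List (Int × Int × Int × Int × Int) :=
  match st.2 with
  | some cu => st.1 ++ [cu]
  | none => st.1

def pvBInner (c : Int) (k : Int × Int) (st : List (Int × Int × Int × Int × Int) × Int × Int)
    (y : Int) : List (Int × Int × Int × Int × Int) × Int × Int :=
  if y == st.2.2 + 1 then (st.1, st.2.1, y)
  else (st.1 ++ [(k.1, st.2.1, k.2, st.2.2, c)], y, y)

def pvBGroup (c : Int) (k : Int × Int) (ys0 : List Int)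
    (acts : List (Int × Int × Int × Int × Int)) : List (Int × Int × Int × Int × Int) :=
  match ys0 with
  | [] => acts
  | y0 :: rest =>
    let st := rest.foldl (pvBInner c k) (acts, y0, y0)
    st.1 ++ [(k.1, st.2.1, k.2, st.2.2, c)]

-- splitting a strictly increasing row list into maximal consecutive blocks
def pvSplitGo (c : Int) (k : Int × Int) : Int → Int → List Int → List (Int × Int × Int × Int × Int)
  | s, p, [] => [(k.1, s, k.2, p, c)]
  | s, p, y :: ys =>
    if y == p + 1 then pvSplitGo c k s y ys else (k.1, s, k.2, p, c) :: pvSplitGo c k y y ys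

def pvSplit (c : Int) (k : Int × Int) : List Int → List (Int × Int × Int × Int × Int)
  | [] => []
  | y0 :: rest => pvSplitGo c k y0 y0 rest

-- the distinct spans of colour c, sorted; the rows of a span; A's rectangles of colour c
def pvKs (c : Int) (es : List (Int × Int × Int × Int)) : List (Int × Int) :=
  PySem.List.sorted
    (PySem.Set.ofList ((es.filter (fun e => e.1 == c)).map (fun e => (e.2.1, e.2.2.1))))
    (fun p => toLex p) false

def pvYs (c : Int) (es : List (Int × Int × Int × Int)) (k : Int × Int) : List Int :=
  (es.filter (fun e => pvKey3 e == (c, k.1, k.2))).map (fun e => e.2.2.2)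

def pvRA (c : Int) (es : List (Int × Int × Int × Int)) : List (Int × Int × Int × Int × Int) :=
  (pvKs c es).flatMap (fun k => pvSplit c k (pvYs c es k))

-- grid-level predicates
def pvMaxRun (row : List Int) (w c x1 x2 : Int) : Prop :=
  0 ≤ x1 ∧ x1 ≤ x2 ∧ x2 < w ∧ (∀ i, x1 ≤ i → i ≤ x2 → PySem.List.pyGetD row i 0 = c) ∧
  (x1 = 0 ∨ PySem.List.pyGetD row (x1 - 1) 0 ≠ c) ∧
  ¬(x2 + 1 < w ∧ PySem.List.pyGetD row (x2 + 1) 0 = c)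

def pvRun (target : List (List Int)) (h w c x1 x2 y : Int) : Prop :=
  0 ≤ y ∧ y < h ∧ pvMaxRun (PySem.List.pyGetD target y []) w c x1 x2

def pvRectP (target : List (List Int)) (h w c x1 a x2 b : Int) : Prop :=
  a ≤ b ∧ (∀ t, a ≤ t → t ≤ b → pvRun target h w c x1 x2 t) ∧
  ¬ pvRun target h w c x1 x2 (a - 1) ∧ ¬ pvRun target h w c x1 x2 (b + 1)

def pvRB (target : List (List Int)) (h w c : Int) : List (Int × Int × Int × Int × Int) :=
  (PySem.List.pyRange 0 h 1).flatMap (fun y =>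
    pvRowScanB target h w c (PySem.List.pyGetD target y []) y 0 w.toNat [])

-- ---------- A's row loop is the event fold ----------

theorem pvRowA_ev (base : Int) (row : List Int) (w y : Int) :
    ∀ (f : Nat) (x : Int) d, pvRowA base row w y x f d = (pvRowEv base row w y x f).foldl pvUpdA d := by
  intro f
  induction f with
  | zero => intro x d; rfl
  | succ f ih =>
    intro x d
    by_cases hx : x < w
    · simp only [pvRowA, pvRowEv, if_pos hx]
      by_cases hc : PySem.List.pyGetD row x 0 != base
      · simp only [if_pos hc, List.singleton_append, List.foldl_cons, ih]; rfl
      · simp only [if_neg hc, List.nil_append, ih]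
    · simp only [pvRowA, pvRowEv, if_neg hx, List.foldl_nil]

theorem pvGridA (base w : Int) :
    ∀ (l : List (Int × List Int)) d,
      l.foldl (fun d yr => pvRowA base yr.2 w yr.1 0 w.toNat d) d = (pvEvents base w l).foldl pvUpdA d := by
  intro l
  induction l with
  | nil => intro d; rfl
  | cons a l ih =>
    intro d
    rw [List.foldl_cons, ih, pvRowA_ev]
    simp only [pvEvents, List.flatMap_cons, List.foldl_append]

theorem pvGetA (es : List (Int × Int × Int × Int)) (c : Int) :
    (es.foldl pvUpdA PySem.Dict.empty).getD c [] = (es.filter (fun e => e.1 == c)).map pvRunOf := by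
  have h1 : es.foldl pvUpdA PySem.Dict.empty
      = ((es.map (fun e => (e.1, pvRunOf e))).foldl
          (fun d p => d.modify p.1 [] (fun v => v ++ [p.2])) PySem.Dict.empty) := by
    rw [List.foldl_map]; rfl
  rw [h1, PySem.Dict.getD_foldl_modify_append, PySem.Dict.getD_empty, List.nil_append,
    List.filter_map, List.map_map]
  rfl

-- ---------- event-list invariants ----------

theorem pvFindEnd_ge (row : List Int) (w c : Int) :
    ∀ (f : Nat) (x2 : Int), x2 ≤ pvFindEnd row w c x2 f := by
  intro f
  induction f with
  | zero => intro x2; exact le_refl _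
  | succ f ih =>
    intro x2
    simp only [pvFindEnd]
    split
    · exact le_trans (by omega) (ih (x2 + 1))
    · exact le_refl _

theorem pvRowEv_mem (base : Int) (row : List Int) (w y : Int) :
    ∀ (f : Nat) (x : Int) e, e ∈ pvRowEv base row w y x f →
      e.2.2.2 = y ∧ x ≤ e.2.1 ∧ e.2.1 ≤ e.2.2.1 := by
  intro f
  induction f with
  | zero => intro x e he; simp [pvRowEv] at he
  | succ f ih =>
    intro x e he
    by_cases hx : x < w
    · simp only [pvRowEv, if_pos hx, List.mem_append] at he
      have hge : x ≤ pvFindEnd row w (PySem.List.pyGetD row x 0) x f :=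
        pvFindEnd_ge row w (PySem.List.pyGetD row x 0) f x
      rcases he with he | he
      · by_cases hc : PySem.List.pyGetD row x 0 != base
        · simp only [if_pos hc, List.mem_singleton] at he
          subst he
          exact ⟨rfl, le_refl _, hge⟩
        · simp [hc] at he
      · obtain ⟨h1, h2, h3⟩ := ih _ e he
        exact ⟨h1, by omega, h3⟩
    · simp [pvRowEv, hx] at he

theorem pvRowEv_pairwise (base : Int) (row : List Int) (w y : Int) :
    ∀ (f : Nat) (x : Int),
      (pvRowEv base row w y x f).Pairwise (fun e1 e2 => e1.2.2.1 < e2.2.1) := by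
  intro f
  induction f with
  | zero => intro x; simp [pvRowEv]
  | succ f ih =>
    intro x
    by_cases hx : x < w
    · simp only [pvRowEv, if_pos hx]
      by_cases hc : PySem.List.pyGetD row x 0 != base
      · simp only [if_pos hc, List.singleton_append]
        refine List.Pairwise.cons ?_ (ih _)
        intro e he
        have h := (pvRowEv_mem base row w y f
          (pvFindEnd row w (PySem.List.pyGetD row x 0) x f + 1) e he).2.1
        show pvFindEnd row w (PySem.List.pyGetD row x 0) x f < e.2.1
        omega
      · simp only [if_neg hc, List.nil_append]; exact ih _
    · simp [pvRowEv, hx]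

theorem pvEvents_facts (base w : Int) :
    ∀ (l : List (Int × List Int)), l.Pairwise (fun a b => a.1 < b.1) →
      (∀ e ∈ pvEvents base w l, e.2.1 ≤ e.2.2.1) ∧
      (pvEvents base w l).Pairwise
        (fun e1 e2 => e1.2.2.2 < e2.2.2.2 ∨ (e1.2.2.2 = e2.2.2.2 ∧ e1.2.2.1 < e2.2.1)) := by
  intro l hl
  constructor
  · intro e he
    simp only [pvEvents, List.mem_flatMap] at he
    obtain ⟨yr, _, hev⟩ := he
    exact (pvRowEv_mem base yr.2 w yr.1 _ _ e hev).2.2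
  · refine List.pairwise_flatMap.mpr ⟨?_, ?_⟩
    · intro a _
      refine List.Pairwise.imp_of_mem ?_ (pvRowEv_pairwise base a.2 w a.1 w.toNat 0)
      intro e1 e2 he1 he2 h
      right
      exact ⟨by rw [(pvRowEv_mem base a.2 w a.1 _ _ e1 he1).1,
        (pvRowEv_mem base a.2 w a.1 _ _ e2 he2).1], h⟩
    · refine List.Pairwise.imp_of_mem ?_ hl
      intro a b _ _ hab
      intro e1 he1 e2 he2
      left
      rw [(pvRowEv_mem base a.2 w a.1 _ _ e1 he1).1, (pvRowEv_mem base b.2 w b.1 _ _ e2 he2).1]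
      exact hab

-- ---------- merge-chain lemmas (A's accumulator pass, per span) ----------

theorem pvMergeGroup (c : Int) (k : Int × Int) :
    ∀ (ys : List Int) (acts : List (Int × Int × Int × Int × Int)) (s p : Int),
      (ys.map (fun y => (k.1, y, k.2, y, c))).foldl (pvMergeStep c) (acts, some (k.1, s, k.2, p, c))
      = ((ys.foldl (pvBInner c k) (acts, s, p)).1,
          some (k.1, (ys.foldl (pvBInner c k) (acts, s, p)).2.1, k.2,
            (ys.foldl (pvBInner c k) (acts, s, p)).2.2, c)) := by
  intro ys
  induction ys with
  | nil => intro acts s p; rfl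
  | cons y ys ih =>
    intro acts s p
    simp only [List.map_cons, List.foldl_cons]
    by_cases hy : y = p + 1
    · have hstep : pvMergeStep c (acts, some (k.1, s, k.2, p, c)) (k.1, y, k.2, y, c)
          = (acts, some (k.1, s, k.2, y, c)) := by
        simp [pvMergeStep, hy]
      have hstep' : pvBInner c k (acts, s, p) y = (acts, s, y) := by
        simp [pvBInner, hy]
      rw [hstep, ih, hstep']
    · have hstep : pvMergeStep c (acts, some (k.1, s, k.2, p, c)) (k.1, y, k.2, y, c)
          = (acts ++ [(k.1, s, k.2, p, c)], some (k.1, y, k.2, y, c)) := by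
        simp [pvMergeStep, hy]
      have hstep' : pvBInner c k (acts, s, p) y = (acts ++ [(k.1, s, k.2, p, c)], y, y) := by
        simp [pvBInner, hy]
      rw [hstep, ih, hstep']

theorem pvMergeStep_flushes (c : Int) (acts : List (Int × Int × Int × Int × Int))
    (cu r : Int × Int × Int × Int × Int) (h : (cu.1, cu.2.2.1) ≠ (r.1, r.2.2.1)) :
    pvMergeStep c (acts, some cu) r = pvMergeStep c (acts ++ [cu], none) r := by
  have : (cu.1 == r.1 && cu.2.2.1 == r.2.2.1 && r.2.1 == cu.2.2.2.1 + 1) = false := by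
    by_cases h1 : cu.1 = r.1
    · by_cases h2 : cu.2.2.1 = r.2.2.1
      · exact absurd (by rw [h1, h2]) h
      · simp [h1, h2]
    · simp [h1]
  simp [pvMergeStep, this]

theorem pvShift (c : Int) (l : List (Int × Int × Int × Int × Int))
    (acts : List (Int × Int × Int × Int × Int)) (cu : Int × Int × Int × Int × Int)
    (h : ∀ r ∈ l.head?, (cu.1, cu.2.2.1) ≠ (r.1, r.2.2.1)) :
    pvFlush (l.foldl (pvMergeStep c) (acts, some cu))
    = pvFlush (l.foldl (pvMergeStep c) (acts ++ [cu], none)) := by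
  cases l with
  | nil => rfl
  | cons r l =>
    rw [List.foldl_cons, List.foldl_cons,
      pvMergeStep_flushes c acts cu r (h r (by simp))]

theorem pvMergeChain (c : Int) (ysF : Int × Int → List Int) :
    ∀ (ks : List (Int × Int)) (acts : List (Int × Int × Int × Int × Int)),
      ks.Nodup → (∀ k ∈ ks, ysF k ≠ []) →
      pvFlush ((ks.flatMap (fun k => (ysF k).map (fun y => (k.1, y, k.2, y, c)))).foldl
        (pvMergeStep c) (acts, none))
      = ks.foldl (fun acts k => pvBGroup c k (ysF k) acts) acts := by
  intro ks
  induction ks with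
  | nil => intro acts _ _; rfl
  | cons k ks ih =>
    intro acts hnd hne
    have hk : k ∉ ks := (List.nodup_cons.mp hnd).1
    obtain ⟨y0, rest, hys⟩ : ∃ y0 rest, ysF k = y0 :: rest := by
      cases h : ysF k with
      | nil => exact absurd h (hne k List.mem_cons_self)
      | cons a l => exact ⟨a, l, rfl⟩
    rw [List.flatMap_cons, hys, List.map_cons, List.foldl_append, List.foldl_cons]
    have hfirst : pvMergeStep c (acts, none) (k.1, y0, k.2, y0, c)
        = (acts, some (k.1, y0, k.2, y0, c)) := rfl
    rw [hfirst, pvMergeGroup]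
    generalize hst : rest.foldl (pvBInner c k) (acts, y0, y0) = st
    have hbg : pvBGroup c k (ysF k) acts = st.1 ++ [(k.1, st.2.1, k.2, st.2.2, c)] := by
      rw [hys]; simp only [pvBGroup]; rw [hst]
    have hshift : pvFlush ((ks.flatMap fun k => (ysF k).map fun y => (k.1, y, k.2, y, c)).foldl
          (pvMergeStep c) (st.1, some (k.1, st.2.1, k.2, st.2.2, c)))
        = pvFlush ((ks.flatMap fun k => (ysF k).map fun y => (k.1, y, k.2, y, c)).foldl
          (pvMergeStep c) (st.1 ++ [(k.1, st.2.1, k.2, st.2.2, c)], none)) := by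
      refine pvShift c _ _ _ ?_
      intro r hr
      cases hks : ks with
      | nil => rw [hks] at hr; simp at hr
      | cons k2 ks2 =>
        obtain ⟨y02, rest2, hys2⟩ : ∃ y02 rest2, ysF k2 = y02 :: rest2 := by
          cases h : ysF k2 with
          | nil => exact absurd h (hne k2 (by rw [hks]; exact List.mem_cons_of_mem _ List.mem_cons_self))
          | cons a l => exact ⟨a, l, rfl⟩
        rw [hks] at hr
        simp only [List.flatMap_cons, hys2, List.map_cons, List.cons_append,
          List.head?_cons, Option.mem_some_iff] at hr
        subst hr
        have hkne : (k : Int × Int) ≠ k2 := by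
          intro hcontra; rw [hks] at hk; exact hk (hcontra ▸ List.mem_cons_self)
        simpa using hkne
    rw [hshift, List.foldl_cons, hbg]
    exact ih (st.1 ++ [(k.1, st.2.1, k.2, st.2.2, c)]) (List.nodup_cons.mp hnd).2
      (fun k2 hk2 => hne k2 (List.mem_cons_of_mem _ hk2))

-- grouping a list by distinct covering keys is a permutation of it
theorem pvPermFlatMapFilter {α κ : Type} [BEq κ] [LawfulBEq κ] (key : α → κ) :
    ∀ (ks : List κ) (l : List α), ks.Nodup → (∀ a ∈ l, key a ∈ ks) →
      (ks.flatMap (fun k => l.filter (fun a => key a == k))).Perm l := by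
  intro ks
  induction ks with
  | nil =>
    intro l _ hcov
    have : l = [] := by
      cases l with
      | nil => rfl
      | cons a l => exact absurd (hcov a (List.mem_cons_self)) (by simp)
    simp [this]
  | cons k ks ih =>
    intro l hnd hcov
    have hk : k ∉ ks := (List.nodup_cons.mp hnd).1
    have hrest : ks.flatMap (fun k' => l.filter (fun a => key a == k'))
        = ks.flatMap (fun k' => (l.filter (fun a => !(key a == k))).filter (fun a => key a == k')) := by
      refine List.flatMap_congr ?_
      intro k' hk'
      rw [List.filter_filter]
      refine (List.filter_congr ?_).symm
      intro a _
      by_cases ha : key a = k'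
      · have hne2 : ¬ k' = k := fun hcontra => hk (hcontra ▸ hk')
        simp [ha, hne2]
      · simp [ha]
    rw [List.flatMap_cons, hrest]
    refine List.Perm.trans (List.Perm.append_left _ (ih _ (List.nodup_cons.mp hnd).2 ?_)) ?_
    · intro a ha
      rw [List.mem_filter] at ha
      have hcov2 := hcov a ha.1
      rcases List.mem_cons.mp hcov2 with h | h
      · exfalso; rw [h] at ha; simp at ha
      · exact h
    · exact List.filter_append_perm _ l

-- ---------- pvBGroup as append of pvSplit ----------

theorem pvBInner_acc (c : Int) (k : Int × Int) :
    ∀ (ys : List Int) (acts : List (Int × Int × Int × Int × Int)) (s p : Int),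
      (ys.foldl (pvBInner c k) (acts, s, p)).1
        ++ [(k.1, (ys.foldl (pvBInner c k) (acts, s, p)).2.1, k.2,
             (ys.foldl (pvBInner c k) (acts, s, p)).2.2, c)]
      = acts ++ pvSplitGo c k s p ys := by
  intro ys
  induction ys with
  | nil => intro acts s p; rfl
  | cons y ys ih =>
    intro acts s p
    simp only [List.foldl_cons, pvSplitGo, pvBInner]
    by_cases hy : y = p + 1
    · simp only [hy, beq_self_eq_true, if_pos]
      exact ih acts s (p + 1)
    · have hb : (y == p + 1) = false := by simpa using hy
      simp only [hb, Bool.false_eq_true, if_false, ih, List.append_assoc, List.singleton_append]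


theorem pvBGroup_split (c : Int) (k : Int × Int) (ys : List Int)
    (acts : List (Int × Int × Int × Int × Int)) :
    pvBGroup c k ys acts = acts ++ pvSplit c k ys := by
  cases ys with
  | nil => simp [pvBGroup, pvSplit]
  | cons y0 rest =>
    simp only [pvBGroup, pvSplit]
    exact pvBInner_acc c k rest acts y0 y0


theorem pvFoldBGroup (c : Int) (ysF : Int × Int → List Int) :
    ∀ (ks : List (Int × Int)) (acts : List (Int × Int × Int × Int × Int)),
      ks.foldl (fun acts k => pvBGroup c k (ysF k) acts) acts
      = acts ++ ks.flatMap (fun k => pvSplit c k (ysF k)) := by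
  intro ks
  induction ks with
  | nil => intro acts; simp
  | cons k ks ih =>
    intro acts
    rw [List.foldl_cons, pvBGroup_split, ih, List.flatMap_cons, List.append_assoc]



-- ---------- findEnd specification ----------

theorem pvFindEnd_props (row : List Int) (w c : Int) :
    ∀ (f : Nat) (x2 : Int), x2 < w → w ≤ x2 + 1 + f →
      x2 ≤ pvFindEnd row w c x2 f ∧ pvFindEnd row w c x2 f < w ∧
      (∀ i, x2 < i → i ≤ pvFindEnd row w c x2 f → PySem.List.pyGetD row i 0 = c) ∧
      ¬(pvFindEnd row w c x2 f + 1 < w ∧ PySem.List.pyGetD row (pvFindEnd row w c x2 f + 1) 0 = c) := by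
  intro f
  induction f with
  | zero =>
    intro x2 hxw hf
    simp only [pvFindEnd]
    refine ⟨le_refl _, hxw, ?_, ?_⟩
    · intro i h1 h2; omega
    · omega
  | succ f ih =>
    intro x2 hxw hf
    by_cases hc : (x2 + 1 < w && PySem.List.pyGetD row (x2 + 1) 0 == c) = true
    · have hlt : x2 + 1 < w := by
        rcases Bool.and_eq_true .. |>.mp hc with ⟨h1, _⟩
        exact of_decide_eq_true h1
      have hcell : PySem.List.pyGetD row (x2 + 1) 0 = c := by
        rcases Bool.and_eq_true .. |>.mp hc with ⟨_, h2⟩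
        exact eq_of_beq h2
      have heq : pvFindEnd row w c x2 (Nat.succ f) = pvFindEnd row w c (x2 + 1) f := by
        simp only [pvFindEnd, hc, if_pos]
      obtain ⟨ih1, ih2, ih3, ih4⟩ := ih (x2 + 1) hlt (by omega)
      rw [heq]
      refine ⟨by omega, ih2, ?_, ih4⟩
      intro i h1 h2
      by_cases hi : i = x2 + 1
      · rw [hi]; exact hcell
      · exact ih3 i (by omega) h2
    · have heq : pvFindEnd row w c x2 (Nat.succ f) = x2 := by
        simp only [pvFindEnd, hc, if_neg]; simp [hc]
      rw [heq]
      refine ⟨le_refl _, hxw, ?_, ?_⟩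
      · intro i h1 h2; omega
      · intro ⟨h1, h2⟩
        apply hc
        simp [h1, h2]


theorem pvFindEnd_unique (row : List Int) (w c : Int) (f : Nat) (x1 x2 : Int)
    (hm : pvMaxRun row w c x1 x2) (hf : w ≤ x1 + 1 + f) :
    pvFindEnd row w c x1 f = x2 := by
  obtain ⟨hx1, h12, h2w, hcells, _, hright⟩ := hm
  have hx1w : x1 < w := by omega
  obtain ⟨p1, p2, p3, p4⟩ := pvFindEnd_props row w c f x1 hx1w hf
  set e := pvFindEnd row w c x1 f with he
  by_contra hne
  rcases lt_or_gt_of_ne hne with hlt | hgt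
  · -- e < x2 : row[e+1] = c contradicts the stop condition
    exact p4 ⟨by omega, hcells (e + 1) (by omega) (by omega)⟩
  · -- x2 < e : row[x2+1] = c contradicts right-maximality
    exact hright ⟨by omega, p3 (x2 + 1) (by omega) (by omega)⟩


-- ---------- event membership characterisation ----------

theorem pvRowEv_char (base : Int) (row : List Int) (w y : Int) :
    ∀ (f : Nat) (x : Int), 0 ≤ x → w ≤ x + f →
      (x = 0 ∨ w ≤ x ∨ PySem.List.pyGetD row (x - 1) 0 ≠ PySem.List.pyGetD row x 0) →
      ∀ c x1 x2 yy, ((c, x1, x2, yy) ∈ pvRowEv base row w y x f ↔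
        yy = y ∧ c ≠ base ∧ x ≤ x1 ∧ pvMaxRun row w c x1 x2) := by
  intro f
  induction f with
  | zero =>
    intro x hx0 hxf hinv c x1 x2 yy
    constructor
    · intro h; simp [pvRowEv] at h
    · rintro ⟨hyy, hc, hxx1, hm⟩
      obtain ⟨hx1n, h12, h2w, -, -, -⟩ := hm
      omega
  | succ f ih =>
    intro x hx0 hxf hinv c x1 x2 yy
    by_cases hxw : x < w
    · have hlist : pvRowEv base row w y x (Nat.succ f)
          = (if PySem.List.pyGetD row x 0 != base then
              [(PySem.List.pyGetD row x 0, x, pvFindEnd row w (PySem.List.pyGetD row x 0) x f, y)]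
            else []) ++ pvRowEv base row w y
              (pvFindEnd row w (PySem.List.pyGetD row x 0) x f + 1) f := by
        simp only [pvRowEv, if_pos hxw]
      set c0 := PySem.List.pyGetD row x 0 with hc0
      set e := pvFindEnd row w c0 x f with he
      obtain ⟨p1, p2, p3, p4⟩ := pvFindEnd_props row w c0 f x hxw (by omega)
      have hcells : ∀ i, x ≤ i → i ≤ e → PySem.List.pyGetD row i 0 = c0 := by
        intro i h1 h2
        rcases eq_or_lt_of_le h1 with h | h
        · rw [← h]
        · exact p3 i h h2
      have hrowe : PySem.List.pyGetD row e 0 = c0 := hcells e p1 le_rfl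
      have hih := ih (e + 1) (by omega) (by omega) (by
        by_cases hew : e + 1 < w
        · have h1 : (e + 1 : Int) - 1 = e := by ring
          right; right
          rw [h1, hrowe]
          intro hh
          exact p4 ⟨hew, hh.symm⟩
        · right; left; omega)
      rw [hlist, List.mem_append]
      constructor
      · rintro (hmem | hmem)
        · by_cases hcb : c0 != base
          · simp only [if_pos hcb, List.mem_singleton, Prod.mk.injEq] at hmem
            obtain ⟨hc1, hx1e, hx2e, hyye⟩ := hmem
            have hcne : c ≠ base := by
              rw [hc1]; simpa using hcb
            refine ⟨hyye, hcne, le_of_eq hx1e.symm, ?_⟩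
            subst hc1; subst hx1e; subst hx2e
            refine ⟨hx0, p1, p2, hcells, ?_, p4⟩
            rcases hinv with h0 | hw | hne
            · exact Or.inl h0
            · omega
            · exact Or.inr hne
          · simp [hcb] at hmem
        · obtain ⟨hyy, hc, hx1, hm⟩ := (hih c x1 x2 yy).mp hmem
          exact ⟨hyy, hc, by omega, hm⟩
      · rintro ⟨hyy, hcb, hxx1, hm⟩
        obtain ⟨hx1n, h12, h2w, hcells2, hleft, hright⟩ := hm
        by_cases hx1x : x1 = x
        · left
          have hcc0 : c = c0 := by
            rw [hc0, ← hx1x]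
            exact (hcells2 x1 le_rfl h12).symm
          have hx2e : pvFindEnd row w c x1 f = x2 :=
            pvFindEnd_unique row w c f x1 x2 ⟨hx1n, h12, h2w, hcells2, hleft, hright⟩ (by omega)
          have hcb0 : (c0 != base) = true := by
            rw [← hcc0]; simpa using hcb
          rw [if_pos hcb0]
          simp only [List.mem_singleton, Prod.mk.injEq]
          refine ⟨hcc0, hx1x, ?_, hyy⟩
          have hgoal : pvFindEnd row w c x f = x2 := by rw [hx1x] at hx2e; exact hx2e
          rw [he, ← hcc0]
          exact hgoal.symm
        · right
          have hxlt : x < x1 := lt_of_le_of_ne hxx1 (Ne.symm hx1x)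
          have hge : e + 1 ≤ x1 := by
            by_contra hcon
            have hx1e : x1 ≤ e := by omega
            have hr1 : PySem.List.pyGetD row x1 0 = c0 := hcells x1 (by omega) hx1e
            have hr0 : PySem.List.pyGetD row (x1 - 1) 0 = c0 := hcells (x1 - 1) (by omega) (by omega)
            have hcc : c = c0 := by rw [← hcells2 x1 le_rfl h12, hr1]
            rcases hleft with h0 | hne
            · omega
            · exact hne (by rw [hr0, ← hcc])
          exact (hih c x1 x2 yy).mpr ⟨hyy, hcb, hge,
            ⟨hx1n, h12, h2w, hcells2, hleft, hright⟩⟩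
    · constructor
      · intro h; simp [pvRowEv, hxw] at h
      · rintro ⟨hyy, hc, hxx1, hm⟩
        obtain ⟨hx1n, h12, h2w, -, -, -⟩ := hm
        omega


theorem pvE_mem (target : List (List Int)) (base w c x1 x2 y : Int) :
    (c, x1, x2, y) ∈ pvEvents base w (PySem.List.enumerate target) ↔
      c ≠ base ∧ pvRun target target.length w c x1 x2 y := by
  simp only [pvEvents, List.mem_flatMap]
  constructor
  · rintro ⟨yr, hyr, hev⟩
    obtain ⟨k, hk, hp⟩ := (PySem.List.mem_enumerate_iff _ _ _).mp hyr
    have h1 : yr.1 = (k : Int) := by rw [hp]; simp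
    have h2 : yr.2 = target[k] := by rw [hp]
    obtain ⟨hyy, hc, -, hm⟩ := (pvRowEv_char base yr.2 w yr.1 w.toNat 0 le_rfl
      (by omega) (Or.inl rfl) c x1 x2 y).mp hev
    have hye : y = (k : Int) := by rw [hyy, h1]
    have hkl : (k : Int) < target.length := by exact_mod_cast hk
    refine ⟨hc, by omega, by omega, ?_⟩
    have hrow : PySem.List.pyGetD target y [] = yr.2 := by
      rw [h2, hye, PySem.List.pyGetD_eq_getElem target [] (by positivity) (by exact_mod_cast hk)]
      simp
    rw [hrow]; exact hm
  · rintro ⟨hc, hy0, hyh, hm⟩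
    have hk : y.toNat < target.length := by omega
    have hrow : PySem.List.pyGetD target y [] = target[y.toNat] :=
      PySem.List.pyGetD_eq_getElem target [] (by omega) (by omega)
    refine ⟨((y.toNat : Int), target[y.toNat]), ?_, ?_⟩
    · exact (PySem.List.mem_enumerate_iff _ _ _).mpr ⟨y.toNat, hk, by simp⟩
    · refine (pvRowEv_char base target[y.toNat] w (y.toNat : Int) w.toNat 0 le_rfl
        (by omega) (Or.inl rfl) c x1 x2 y).mpr ⟨by omega, hc, ?_, ?_⟩
      · exact hm.1
      · rw [← hrow]; exact hm

-- ---------- B-side specifications ----------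

theorem pvIsRunB_iff (target : List (List Int)) (h w y x1 x2 c : Int)
    (hx1 : 0 ≤ x1) (h12 : x1 ≤ x2) (h2w : x2 < w) :
    (pvIsRunB target h w y x1 x2 c = true ↔ pvRun target h w c x1 x2 y) := by
  unfold pvIsRunB pvRun pvMaxRun
  by_cases hy : (y < 0 || h ≤ y) = true
  · rw [if_pos hy]
    have hy2 : y < 0 ∨ h ≤ y := by simpa using hy
    constructor
    · intro hf; exact absurd hf (by simp)
    · rintro ⟨h1, h2, -⟩; exfalso; rcases hy2 with hh | hh <;> omega
  · rw [if_neg hy]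
    have hy2 : 0 ≤ y ∧ y < h := by
      simp only [Bool.or_eq_true, decide_eq_true_eq, not_or] at hy
      omega
    constructor
    · intro ht
      by_cases hA : ((PySem.List.pyRange x1 (x2 + 1) 1).any fun x =>
          PySem.List.pyGetD (PySem.List.pyGetD target y []) x 0 != c) = true
      · rw [if_pos hA] at ht; exact absurd ht (by simp)
      · rw [if_neg hA] at ht
        by_cases hL : (0 < x1 && PySem.List.pyGetD (PySem.List.pyGetD target y []) (x1 - 1) 0 == c) = true
        · rw [if_pos hL] at ht; exact absurd ht (by simp)
        · rw [if_neg hL] at ht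
          by_cases hR : (x2 + 1 < w && PySem.List.pyGetD (PySem.List.pyGetD target y []) (x2 + 1) 0 == c) = true
          · rw [if_pos hR] at ht; exact absurd ht (by simp)
          · refine ⟨hy2.1, hy2.2, hx1, h12, h2w, ?_, ?_, ?_⟩
            · intro i h1 h2
              simp only [Bool.not_eq_true, List.any_eq_false] at hA
              have := hA i (PySem.List.mem_pyRange_one.mpr ⟨h1, by omega⟩)
              simpa using this
            · simp only [Bool.not_eq_true, Bool.and_eq_false_iff] at hL
              rcases hL with h0 | hne
              · left; have : ¬ (0 < x1) := by simpa using h0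
                omega
              · right; simpa using hne
            · simp only [Bool.not_eq_true, Bool.and_eq_false_iff] at hR
              rintro ⟨hw2, hc2⟩
              rcases hR with h0 | hne
              · exact absurd hw2 (by simpa using h0)
              · exact absurd hc2 (by simpa using hne)
    · rintro ⟨hy0, hyh, -, -, -, hcells, hleft, hright⟩
      have hA : ((PySem.List.pyRange x1 (x2 + 1) 1).any fun x =>
          PySem.List.pyGetD (PySem.List.pyGetD target y []) x 0 != c) = false := by
        rw [List.any_eq_false]
        intro i hi
        obtain ⟨hi1, hi2⟩ := PySem.List.mem_pyRange_one.mp hi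
        simp [hcells i hi1 (by omega)]
      have hL : (0 < x1 && PySem.List.pyGetD (PySem.List.pyGetD target y []) (x1 - 1) 0 == c) = false := by
        rcases hleft with h0 | hne
        · simp [h0]
        · simp [hne]
      have hR : (x2 + 1 < w && PySem.List.pyGetD (PySem.List.pyGetD target y []) (x2 + 1) 0 == c) = false := by
        by_cases hww : x2 + 1 < w
        · have : PySem.List.pyGetD (PySem.List.pyGetD target y []) (x2 + 1) 0 ≠ c :=
            fun hcon => hright ⟨hww, hcon⟩
          simp [this]
        · simp [hww]
      simp [hA, hL, hR]


theorem pvGrow_props (target : List (List Int)) (h w x1 x2 c : Int)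
    (hx1 : 0 ≤ x1) (h12 : x1 ≤ x2) (h2w : x2 < w) :
    ∀ (f : Nat) (y : Int), (h - y).toNat ≤ f →
      y ≤ pvGrow target h w x1 x2 c y f ∧
      (∀ t, y < t → t ≤ pvGrow target h w x1 x2 c y f → pvRun target h w c x1 x2 t) ∧
      ¬ pvRun target h w c x1 x2 (pvGrow target h w x1 x2 c y f + 1) := by
  intro f
  induction f with
  | zero =>
    intro y hf
    simp only [pvGrow]
    refine ⟨le_rfl, ?_, ?_⟩
    · intro t h1 h2; omega
    · rintro ⟨-, ht, -⟩; omega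
  | succ f ih =>
    intro y hf
    by_cases hr : pvIsRunB target h w (y + 1) x1 x2 c = true
    · have hrun : pvRun target h w c x1 x2 (y + 1) :=
        (pvIsRunB_iff target h w (y + 1) x1 x2 c hx1 h12 h2w).mp hr
      have heq : pvGrow target h w x1 x2 c y (Nat.succ f) = pvGrow target h w x1 x2 c (y + 1) f := by
        simp only [pvGrow, hr, if_true]
      obtain ⟨i1, i2, i3⟩ := ih (y + 1) (by have := hrun.2.1; omega)
      rw [heq]
      refine ⟨by omega, ?_, i3⟩
      intro t h1 h2
      by_cases ht : t = y + 1
      · rw [ht]; exact hrun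
      · exact i2 t (by omega) h2
    · have hr' : pvIsRunB target h w (y + 1) x1 x2 c = false := by simpa using hr
      have heq : pvGrow target h w x1 x2 c y (Nat.succ f) = y := by
        simp [pvGrow, hr']
      rw [heq]
      refine ⟨le_rfl, by intro t h1 h2; omega, ?_⟩
      intro hcon
      exact hr ((pvIsRunB_iff target h w (y + 1) x1 x2 c hx1 h12 h2w).mpr hcon)


theorem pvRowScanB_acc (target : List (List Int)) (h w c : Int) (row : List Int) (y : Int) :
    ∀ (f : Nat) (x : Int) (r : List (Int × Int × Int × Int × Int)),
      pvRowScanB target h w c row y x f r = r ++ pvRowScanB target h w c row y x f [] := by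
  intro f
  induction f with
  | zero => intro x r; simp [pvRowScanB]
  | succ f ih =>
    intro x r
    by_cases hxw : x < w
    · by_cases hc : (PySem.List.pyGetD row x 0 != c) = true
      · simp only [pvRowScanB, if_pos hxw, if_pos hc]
        exact ih (x + 1) r
      · simp only [pvRowScanB, if_pos hxw, if_neg hc]
        cases hb : pvIsRunB target h w (y - 1) x (pvFindEnd row w c x f) c
        · simp only [hb, Bool.not_false, if_pos]
          rw [ih _ (r ++ [_]), ih _ ([] ++ [_])]
          simp
        · simp only [hb, Bool.not_true, Bool.false_eq_true, if_false]
          exact ih _ r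
    · simp [pvRowScanB, hxw]


theorem pvRowScanB_mem (target : List (List Int)) (h w c : Int) (row : List Int) (y : Int) :
    ∀ (f : Nat) (x : Int), 0 ≤ x → w ≤ x + f →
      (x = 0 ∨ w ≤ x ∨ ¬(PySem.List.pyGetD row (x - 1) 0 = c ∧ PySem.List.pyGetD row x 0 = c)) →
      ∀ r, (r ∈ pvRowScanB target h w c row y x f [] ↔
        ∃ x1 x2, x ≤ x1 ∧ pvMaxRun row w c x1 x2 ∧ pvIsRunB target h w (y - 1) x1 x2 c = false ∧
          r = (x1, y, x2, pvGrow target h w x1 x2 c y h.toNat, c)) := by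
  intro f
  induction f with
  | zero =>
    intro x hx0 hxf hinv r
    constructor
    · intro hmem; simp [pvRowScanB] at hmem
    · rintro ⟨a, b, hxa, hm, -, -⟩
      obtain ⟨h1, h2, h3, -, -, -⟩ := hm
      exfalso; omega
  | succ f ih =>
    intro x hx0 hxf hinv r
    by_cases hxw : x < w
    · by_cases hcx : (PySem.List.pyGetD row x 0 != c) = true
      · have hlist : pvRowScanB target h w c row y x (Nat.succ f) []
            = pvRowScanB target h w c row y (x + 1) f [] := by
          simp only [pvRowScanB, if_pos hxw, if_pos hcx]
        have hne : PySem.List.pyGetD row x 0 ≠ c := by simpa using hcx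
        have hih := ih (x + 1) (by omega) (by omega) (by
          right; right
          rintro ⟨ha, -⟩
          apply hne
          have hxx : (x + 1 : Int) - 1 = x := by ring
          rwa [hxx] at ha)
        rw [hlist, hih r]
        constructor
        · rintro ⟨a, b, hxa, hm, hir, hr⟩
          exact ⟨a, b, by omega, hm, hir, hr⟩
        · rintro ⟨a, b, hxa, hm, hir, hr⟩
          have hax : a ≠ x := fun hax => hne (by rw [← hax]; exact hm.2.2.2.1 a le_rfl hm.2.1)
          exact ⟨a, b, by omega, hm, hir, hr⟩
      · have hcx' : PySem.List.pyGetD row x 0 = c := by simpa using hcx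
        obtain ⟨p1, p2, p3, p4⟩ := pvFindEnd_props row w c f x hxw (by omega)
        set e := pvFindEnd row w c x f with he
        have hcells : ∀ i, x ≤ i → i ≤ e → PySem.List.pyGetD row i 0 = c := by
          intro i h1 h2
          rcases eq_or_lt_of_le h1 with hh | hh
          · rw [← hh]; exact hcx'
          · exact p3 i hh h2
        have hmax : pvMaxRun row w c x e := by
          refine ⟨hx0, p1, p2, hcells, ?_, p4⟩
          rcases hinv with h0 | hw | hni
          · exact Or.inl h0
          · omega
          · right; intro hcon; exact hni ⟨hcon, hcx'⟩
        have hlist : pvRowScanB target h w c row y x (Nat.succ f) []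
            = (if !pvIsRunB target h w (y - 1) x e c then
                [(x, y, e, pvGrow target h w x e c y h.toNat, c)] else [])
              ++ pvRowScanB target h w c row y (e + 1) f [] := by
          simp only [pvRowScanB, if_pos hxw, if_neg hcx, ← he]
          cases hb : pvIsRunB target h w (y - 1) x e c
          · simp only [hb, Bool.not_false, if_pos]
            rw [pvRowScanB_acc]
            simp
          · simp [hb]
        have hinv' : e + 1 = 0 ∨ w ≤ e + 1 ∨
            ¬(PySem.List.pyGetD row (e + 1 - 1) 0 = c ∧ PySem.List.pyGetD row (e + 1) 0 = c) := by
          by_cases hew : e + 1 < w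
          · right; right
            rintro ⟨-, hb2⟩
            exact p4 ⟨hew, hb2⟩
          · right; left; omega
        have hih := ih (e + 1) (by omega) (by omega) hinv'
        rw [hlist, List.mem_append, hih r]
        constructor
        · rintro (hmem | ⟨a, b, hxa, hm, hir, hr⟩)
          · by_cases hb : pvIsRunB target h w (y - 1) x e c = true
            · rw [if_neg (by simp [hb])] at hmem; simp at hmem
            · rw [if_pos (by simpa using hb)] at hmem
              simp only [List.mem_singleton] at hmem
              exact ⟨x, e, le_rfl, hmax, by simpa using hb, hmem⟩
          · exact ⟨a, b, by omega, hm, hir, hr⟩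
        · rintro ⟨a, b, hxa, hm, hir, hr⟩
          by_cases hax : a = x
          · left
            subst hax
            have hfb : pvFindEnd row w c a f = b := pvFindEnd_unique row w c f a b hm (by omega)
            have hbe : e = b := by rw [he, hfb]
            rw [hbe]
            rw [if_pos (by simp [hir])]
            simp [hr]
          · right
            have hxlt : x < a := lt_of_le_of_ne hxa (Ne.symm hax)
            have hge : e + 1 ≤ a := by
              by_contra hcon
              have hae : a ≤ e := by omega
              obtain ⟨ha1, ha2, ha3, hacells, haleft, -⟩ := hm
              have hr1 : PySem.List.pyGetD row (a - 1) 0 = c := hcells (a - 1) (by omega) (by omega)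
              rcases haleft with h0 | hne2
              · omega
              · exact hne2 hr1
            exact ⟨a, b, hge, hm, hir, hr⟩
    · constructor
      · intro hmem; simp [pvRowScanB, hxw] at hmem
      · rintro ⟨a, b, hxa, hm, -, -⟩
        obtain ⟨h1, h2, h3, -, -, -⟩ := hm
        exfalso; omega


theorem pvRowScanB_facts (target : List (List Int)) (h w c : Int) (row : List Int) (y : Int) :
    ∀ (f : Nat) (x : Int),
      (∀ r ∈ pvRowScanB target h w c row y x f [], x ≤ r.1 ∧ r.2.1 = y) ∧
      (pvRowScanB target h w c row y x f []).Pairwise (fun a b => a.1 < b.1) := by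
  intro f
  induction f with
  | zero =>
    intro x
    constructor
    · intro r hr; simp [pvRowScanB] at hr
    · simp [pvRowScanB]
  | succ f ih =>
    intro x
    by_cases hxw : x < w
    · by_cases hcx : (PySem.List.pyGetD row x 0 != c) = true
      · have hlist : pvRowScanB target h w c row y x (Nat.succ f) []
            = pvRowScanB target h w c row y (x + 1) f [] := by
          simp only [pvRowScanB, if_pos hxw, if_pos hcx]
        rw [hlist]
        constructor
        · intro r hr
          obtain ⟨h1, h2⟩ := (ih (x + 1)).1 r hr
          exact ⟨by omega, h2⟩
        · exact (ih (x + 1)).2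
      · set e := pvFindEnd row w c x f with he
        have hxe : x ≤ e := pvFindEnd_ge row w c f x
        have hlist : pvRowScanB target h w c row y x (Nat.succ f) []
            = (if !pvIsRunB target h w (y - 1) x e c then
                [(x, y, e, pvGrow target h w x e c y h.toNat, c)] else [])
              ++ pvRowScanB target h w c row y (e + 1) f [] := by
          simp only [pvRowScanB, if_pos hxw, if_neg hcx, ← he]
          cases hb : pvIsRunB target h w (y - 1) x e c
          · simp only [hb, Bool.not_false, if_pos]
            rw [pvRowScanB_acc]
            simp
          · simp [hb]
        have hhead : ∀ a, a ∈ (if !pvIsRunB target h w (y - 1) x e c then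
              [((x : Int), y, e, pvGrow target h w x e c y h.toNat, c)] else []) →
            a = ((x : Int), y, e, pvGrow target h w x e c y h.toNat, c) := by
          intro a ha
          split at ha
          · simpa using ha
          · simp at ha
        rw [hlist]
        constructor
        · intro r hr
          rcases List.mem_append.mp hr with hr | hr
          · rw [hhead r hr]; exact ⟨le_rfl, rfl⟩
          · obtain ⟨h1, h2⟩ := (ih (e + 1)).1 r hr
            exact ⟨by omega, h2⟩
        · refine List.pairwise_append.mpr ⟨?_, (ih (e + 1)).2, ?_⟩
          · split
            · simp
            · simp
          · intro a ha b hb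
            have ha1 : a.1 = x := by rw [hhead a ha]
            have hb1 := ((ih (e + 1)).1 b hb).1
            omega
    · constructor
      · intro r hr; simp [pvRowScanB, hxw] at hr
      · simp [pvRowScanB, hxw]


-- ---------- pvSplit membership and order ----------

theorem pvSplitGo_facts (c : Int) (k : Int × Int) :
    ∀ (ys : List Int) (s p : Int), s ≤ p → (∀ t ∈ ys, p < t) → ys.Pairwise (· < ·) →
      (∀ r ∈ pvSplitGo c k s p ys,
        r.1 = k.1 ∧ r.2.2.1 = k.2 ∧ r.2.2.2.2 = c ∧ s ≤ r.2.1) ∧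
      (pvSplitGo c k s p ys).Pairwise (fun a b => a.2.1 < b.2.1) := by
  intro ys
  induction ys with
  | nil =>
    intro s p hsp hgt hpw
    constructor
    · intro r hr
      simp only [pvSplitGo, List.mem_singleton] at hr
      subst hr
      exact ⟨rfl, rfl, rfl, le_rfl⟩
    · simp [pvSplitGo]
  | cons y ys ih =>
    intro s p hsp hgt hpw
    have hpy : p < y := hgt y List.mem_cons_self
    obtain ⟨hyys, hpw'⟩ := List.pairwise_cons.mp hpw
    by_cases hy : y = p + 1
    · have hb : (y == p + 1) = true := by simpa using hy
      simp only [pvSplitGo, hb, if_pos]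
      exact ih s y (by omega) hyys hpw'
    · have hb : (y == p + 1) = false := by simpa using hy
      simp only [pvSplitGo, hb, Bool.false_eq_true, if_false]
      obtain ⟨ihm, ihp⟩ := ih y y le_rfl hyys hpw'
      constructor
      · intro r hr
        rcases List.mem_cons.mp hr with hr | hr
        · subst hr; exact ⟨rfl, rfl, rfl, le_rfl⟩
        · obtain ⟨a1, a2, a3, a4⟩ := ihm r hr
          exact ⟨a1, a2, a3, by omega⟩
      · refine List.Pairwise.cons ?_ ihp
        intro r hr
        have h4 := (ihm r hr).2.2.2
        show s < r.2.1
        omega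


theorem pvSplitGo_mem (c : Int) (k : Int × Int) :
    ∀ (ys : List Int) (s p : Int), s ≤ p → (∀ t ∈ ys, p < t) → ys.Pairwise (· < ·) →
      ∀ r, (r ∈ pvSplitGo c k s p ys ↔
        (∃ b, r = (k.1, s, k.2, b, c) ∧ p ≤ b ∧ (∀ t, p < t → t ≤ b → t ∈ ys) ∧ (b + 1) ∉ ys)
        ∨ (∃ a b, r = (k.1, a, k.2, b, c) ∧ p + 1 < a ∧ a ≤ b ∧ a ∈ ys ∧
            (∀ t, a ≤ t → t ≤ b → t ∈ ys) ∧ (a - 1) ∉ ys ∧ (b + 1) ∉ ys)) := by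
  intro ys
  induction ys with
  | nil =>
    intro s p hsp hgt hpw r
    simp only [pvSplitGo, List.mem_singleton]
    constructor
    · intro hr
      left
      exact ⟨p, hr, le_rfl, by intro t h1 h2; omega, by simp⟩
    · rintro (⟨b, hr, hpb, hint, -⟩ | ⟨a, b, -, -, -, ha, -, -, -⟩)
      · have hbp : b = p := by
          by_contra hne
          exact absurd (hint (p + 1) (by omega) (by omega)) (by simp)
        rw [hr, hbp]
      · exact absurd ha (by simp)
  | cons y ys ih =>
    intro s p hsp hgt hpw r
    have hpy : p < y := hgt y List.mem_cons_self
    obtain ⟨hyys, hpw'⟩ := List.pairwise_cons.mp hpw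
    by_cases hy : y = p + 1
    · have hb : (y == p + 1) = true := by simpa using hy
      have hgo : pvSplitGo c k s p (y :: ys) = pvSplitGo c k s y ys := by
        simp only [pvSplitGo, hb, if_pos]
      rw [hgo, ih s y (by omega) hyys hpw' r]
      subst hy
      constructor
      · rintro (⟨b, hr, hpb, hint, hnb⟩ | ⟨a, b, hr, hpa, hab, ha, hint, hna, hnb⟩)
        · left
          refine ⟨b, hr, by omega, ?_, ?_⟩
          · intro t h1 h2
            rcases eq_or_lt_of_le (show p + 1 ≤ t by omega) with hh | hh
            · exact hh ▸ List.mem_cons_self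
            · exact List.mem_cons_of_mem _ (hint t hh h2)
          · intro hcon
            rcases List.mem_cons.mp hcon with hh | hh
            · omega
            · exact hnb hh
        · right
          refine ⟨a, b, hr, by omega, hab, List.mem_cons_of_mem _ ha, ?_, ?_, ?_⟩
          · intro t h1 h2
            exact List.mem_cons_of_mem _ (hint t h1 h2)
          · intro hcon
            rcases List.mem_cons.mp hcon with hh | hh
            · omega
            · exact hna hh
          · intro hcon
            rcases List.mem_cons.mp hcon with hh | hh
            · omega
            · exact hnb hh
      · rintro (⟨b, hr, hpb, hint, hnb⟩ | ⟨a, b, hr, hpa, hab, ha, hint, hna, hnb⟩)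
        · left
          have hyb : p + 1 ≤ b := by
            by_contra hcon
            have hbp : b = p := by omega
            exact hnb (by rw [show b + 1 = p + 1 by omega]; exact List.mem_cons_self)
          refine ⟨b, hr, hyb, ?_, fun hcon => hnb (List.mem_cons_of_mem _ hcon)⟩
          intro t h1 h2
          have ht := hint t (by omega) h2
          rcases List.mem_cons.mp ht with hh | hh
          · omega
          · exact hh
        · right
          have ha' : a ∈ ys := by
            rcases List.mem_cons.mp ha with hh | hh
            · omega
            · exact hh
          have hne2 : a ≠ p + 2 := by
            intro hcon
            exact hna (by rw [show a - 1 = p + 1 by omega]; exact List.mem_cons_self)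
          refine ⟨a, b, hr, by omega, hab, ha', ?_, ?_, ?_⟩
          · intro t h1 h2
            have ht := hint t h1 h2
            rcases List.mem_cons.mp ht with hh | hh
            · omega
            · exact hh
          · exact fun hcon => hna (List.mem_cons_of_mem _ hcon)
          · exact fun hcon => hnb (List.mem_cons_of_mem _ hcon)
    · have hb : (y == p + 1) = false := by simpa using hy
      have hgo : pvSplitGo c k s p (y :: ys) = (k.1, s, k.2, p, c) :: pvSplitGo c k y y ys := by
        simp only [pvSplitGo, hb, Bool.false_eq_true, if_false]
      have hpy1 : p + 1 < y := by omega
      rw [hgo, List.mem_cons, ih y y le_rfl hyys hpw' r]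
      constructor
      · rintro (hr | ⟨b, hr, hpb, hint, hnb⟩ | ⟨a, b, hr, hpa, hab, ha, hint, hna, hnb⟩)
        · left
          refine ⟨p, hr, le_rfl, by intro t h1 h2; omega, ?_⟩
          intro hcon
          rcases List.mem_cons.mp hcon with hh | hh
          · omega
          · have := hyys _ hh; omega
        · right
          refine ⟨y, b, hr, hpy1, hpb, List.mem_cons_self, ?_, ?_, ?_⟩
          · intro t h1 h2
            rcases eq_or_lt_of_le h1 with hh | hh
            · exact hh ▸ List.mem_cons_self
            · exact List.mem_cons_of_mem _ (hint t hh h2)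
          · intro hcon
            rcases List.mem_cons.mp hcon with hh | hh
            · omega
            · have := hyys _ hh; omega
          · intro hcon
            rcases List.mem_cons.mp hcon with hh | hh
            · omega
            · exact hnb hh
        · right
          have hya : y < a := hyys _ ha
          refine ⟨a, b, hr, by omega, hab, List.mem_cons_of_mem _ ha, ?_, ?_, ?_⟩
          · intro t h1 h2
            exact List.mem_cons_of_mem _ (hint t h1 h2)
          · intro hcon
            rcases List.mem_cons.mp hcon with hh | hh
            · omega
            · exact hna hh
          · intro hcon
            rcases List.mem_cons.mp hcon with hh | hh
            · omega
            · exact hnb hh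
      · rintro (⟨b, hr, hpb, hint, hnb⟩ | ⟨a, b, hr, hpa, hab, ha, hint, hna, hnb⟩)
        · left
          have hbp : b = p := by
            by_contra hne
            have ht := hint (p + 1) (by omega) (by omega)
            rcases List.mem_cons.mp ht with hh | hh
            · omega
            · have := hyys _ hh; omega
          rw [hr, hbp]
        · right
          by_cases hay : a = y
          · left
            subst hay
            refine ⟨b, hr, hab, ?_, fun hcon => hnb (List.mem_cons_of_mem _ hcon)⟩
            intro t h1 h2
            have ht := hint t (by omega) h2
            rcases List.mem_cons.mp ht with hh | hh
            · omega
            · exact hh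
          · right
            have ha' : a ∈ ys := by
              rcases List.mem_cons.mp ha with hh | hh
              · exact absurd hh hay
              · exact hh
            have hya : y < a := hyys _ ha'
            have hne2 : a ≠ y + 1 := by
              intro hcon
              exact hna (by rw [show a - 1 = y by omega]; exact List.mem_cons_self)
            refine ⟨a, b, hr, by omega, hab, ha', ?_, ?_, ?_⟩
            · intro t h1 h2
              have ht := hint t h1 h2
              rcases List.mem_cons.mp ht with hh | hh
              · omega
              · exact hh
            · exact fun hcon => hna (List.mem_cons_of_mem _ hcon)
            · exact fun hcon => hnb (List.mem_cons_of_mem _ hcon)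


theorem pvSplit_mem (c : Int) (k : Int × Int) (ys : List Int) (hpw : ys.Pairwise (· < ·)) (r) :
    r ∈ pvSplit c k ys ↔
      ∃ a b, r = (k.1, a, k.2, b, c) ∧ a ≤ b ∧ (∀ t, a ≤ t → t ≤ b → t ∈ ys) ∧
        (a - 1) ∉ ys ∧ (b + 1) ∉ ys := by
  cases ys with
  | nil =>
    simp only [pvSplit, List.not_mem_nil, false_iff]
    rintro ⟨a, b, -, hab, hint, -, -⟩
    exact absurd (hint a le_rfl hab) (by simp)
  | cons y0 rest =>
    obtain ⟨hgt, hpw'⟩ := List.pairwise_cons.mp hpw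
    have hgo : pvSplit c k (y0 :: rest) = pvSplitGo c k y0 y0 rest := rfl
    rw [hgo, pvSplitGo_mem c k rest y0 y0 le_rfl hgt hpw' r]
    constructor
    · rintro (⟨b, hr, hpb, hint, hnb⟩ | ⟨a, b, hr, hpa, hab, ha, hint, hna, hnb⟩)
      · refine ⟨y0, b, hr, hpb, ?_, ?_, ?_⟩
        · intro t h1 h2
          rcases eq_or_lt_of_le h1 with hh | hh
          · exact hh ▸ List.mem_cons_self
          · exact List.mem_cons_of_mem _ (hint t hh h2)
        · intro hcon
          rcases List.mem_cons.mp hcon with hh | hh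
          · omega
          · have := hgt _ hh; omega
        · intro hcon
          rcases List.mem_cons.mp hcon with hh | hh
          · omega
          · exact hnb hh
      · have hya : y0 < a := hgt _ ha
        refine ⟨a, b, hr, hab, ?_, ?_, ?_⟩
        · intro t h1 h2
          exact List.mem_cons_of_mem _ (hint t h1 h2)
        · intro hcon
          rcases List.mem_cons.mp hcon with hh | hh
          · omega
          · exact hna hh
        · intro hcon
          rcases List.mem_cons.mp hcon with hh | hh
          · omega
          · exact hnb hh
    · rintro ⟨a, b, hr, hab, hint, hna, hnb⟩
      by_cases hay : a = y0
      · left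
        subst hay
        refine ⟨b, hr, hab, ?_, fun hcon => hnb (List.mem_cons_of_mem _ hcon)⟩
        intro t h1 h2
        have ht := hint t (by omega) h2
        rcases List.mem_cons.mp ht with hh | hh
        · omega
        · exact hh
      · right
        have ha' : a ∈ rest := by
          have := hint a le_rfl hab
          rcases List.mem_cons.mp this with hh | hh
          · exact absurd hh hay
          · exact hh
        have hya : y0 < a := hgt _ ha'
        have hne2 : a ≠ y0 + 1 := by
          intro hcon
          exact hna (by rw [show a - 1 = y0 by omega]; exact List.mem_cons_self)
        refine ⟨a, b, hr, by omega, hab, ha', ?_, ?_, ?_⟩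
        · intro t h1 h2
          have ht := hint t h1 h2
          rcases List.mem_cons.mp ht with hh | hh
          · omega
          · exact hh
        · exact fun hcon => hna (List.mem_cons_of_mem _ hcon)
        · exact fun hcon => hnb (List.mem_cons_of_mem _ hcon)


-- ---------- pvRA membership and order ----------

theorem pvYs_mem (c : Int) (es : List (Int × Int × Int × Int)) (k : Int × Int) (y : Int) :
    y ∈ pvYs c es k ↔ (c, k.1, k.2, y) ∈ es := by
  simp only [pvYs, List.mem_map, List.mem_filter]
  constructor
  · rintro ⟨e, ⟨he, hk⟩, hy⟩
    have hk' : pvKey3 e = (c, k.1, k.2) := by simpa using hk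
    obtain ⟨e1, e2, e3, e4⟩ := e
    simp only [pvKey3, Prod.mk.injEq] at hk'
    obtain ⟨h1, h2, h3⟩ := hk'
    simp only at hy
    rw [← h1, ← h2, ← h3, ← hy]
    exact he
  · intro he
    exact ⟨(c, k.1, k.2, y), ⟨he, by simp [pvKey3]⟩, rfl⟩


theorem pvYs_pairwise (c : Int) (es : List (Int × Int × Int × Int)) (k : Int × Int)
    (hb : ∀ e ∈ es, e.2.1 ≤ e.2.2.1)
    (hp : es.Pairwise (fun e1 e2 => e1.2.2.2 < e2.2.2.2 ∨ (e1.2.2.2 = e2.2.2.2 ∧ e1.2.2.1 < e2.2.1))) :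
    (pvYs c es k).Pairwise (· < ·) := by
  unfold pvYs
  rw [List.pairwise_map]
  have hf := List.Pairwise.filter (fun e => pvKey3 e == (c, k.1, k.2)) hp
  refine List.Pairwise.imp_of_mem ?_ hf
  intro e1 e2 he1 he2 hR
  have h1 : pvKey3 e1 = (c, k.1, k.2) := by simpa using (List.mem_filter.mp he1).2
  have h2 : pvKey3 e2 = (c, k.1, k.2) := by simpa using (List.mem_filter.mp he2).2
  have hx : e1.2.2.1 = e2.2.2.1 := by
    have a1 : e1.2.2.1 = k.2 := congrArg (fun p => p.2.2) h1
    have a2 : e2.2.2.1 = k.2 := congrArg (fun p => p.2.2) h2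
    rw [a1, a2]
  rcases hR with h | ⟨heq, hlt⟩
  · exact h
  · exfalso
    have b2 : e2.2.1 ≤ e2.2.2.1 := hb e2 (List.mem_filter.mp he2).1
    rw [hx] at hlt
    omega


theorem pvKs_mem (c : Int) (es : List (Int × Int × Int × Int)) (k : Int × Int) :
    k ∈ pvKs c es ↔ ∃ y, (c, k.1, k.2, y) ∈ es := by
  unfold pvKs
  rw [PySem.List.mem_sorted]
  constructor
  · intro hk
    obtain ⟨e, he, hke⟩ := List.mem_map.mp ((PySem.Set.mem_ofList _ _).mp hk)
    obtain ⟨he1, he2⟩ := List.mem_filter.mp he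
    have hc : e.1 = c := by simpa using he2
    have h1 : e.2.1 = k.1 := congrArg Prod.fst hke
    have h2 : e.2.2.1 = k.2 := congrArg Prod.snd hke
    refine ⟨e.2.2.2, ?_⟩
    obtain ⟨a1, a2, a3, a4⟩ := e
    simp only at hc h1 h2
    rw [← hc, ← h1, ← h2]
    exact he1
  · rintro ⟨y, hy⟩
    exact (PySem.Set.mem_ofList _ _).mpr
      (List.mem_map.mpr ⟨(c, k.1, k.2, y), List.mem_filter.mpr ⟨hy, by simp⟩, rfl⟩)


theorem pvRA_mem (c : Int) (es : List (Int × Int × Int × Int))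
    (hb : ∀ e ∈ es, e.2.1 ≤ e.2.2.1)
    (hp : es.Pairwise (fun e1 e2 => e1.2.2.2 < e2.2.2.2 ∨ (e1.2.2.2 = e2.2.2.2 ∧ e1.2.2.1 < e2.2.1)))
    (r : Int × Int × Int × Int × Int) :
    r ∈ pvRA c es ↔
      ∃ x1 a x2 b, r = (x1, a, x2, b, c) ∧ a ≤ b ∧
        (∀ t, a ≤ t → t ≤ b → (c, x1, x2, t) ∈ es) ∧
        (c, x1, x2, a - 1) ∉ es ∧ (c, x1, x2, b + 1) ∉ es := by
  unfold pvRA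
  rw [List.mem_flatMap]
  constructor
  · rintro ⟨k, hk, hr⟩
    obtain ⟨a, b, hre, hab, hint, hna, hnb⟩ :=
      (pvSplit_mem c k (pvYs c es k) (pvYs_pairwise c es k hb hp) r).mp hr
    refine ⟨k.1, a, k.2, b, hre, hab, ?_, ?_, ?_⟩
    · intro t h1 h2
      exact (pvYs_mem c es k t).mp (hint t h1 h2)
    · intro hcon; exact hna ((pvYs_mem c es k (a - 1)).mpr hcon)
    · intro hcon; exact hnb ((pvYs_mem c es k (b + 1)).mpr hcon)
  · rintro ⟨x1, a, x2, b, hre, hab, hint, hna, hnb⟩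
    refine ⟨(x1, x2), ?_, ?_⟩
    · exact (pvKs_mem c es (x1, x2)).mpr ⟨a, hint a le_rfl hab⟩
    · refine (pvSplit_mem c (x1, x2) (pvYs c es (x1, x2))
        (pvYs_pairwise c es (x1, x2) hb hp) r).mpr ⟨a, b, hre, hab, ?_, ?_, ?_⟩
      · intro t h1 h2
        exact (pvYs_mem c es (x1, x2) t).mpr (hint t h1 h2)
      · intro hcon; exact hna ((pvYs_mem c es (x1, x2) (a - 1)).mp hcon)
      · intro hcon; exact hnb ((pvYs_mem c es (x1, x2) (b + 1)).mp hcon)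


theorem pvSplit_shape (c : Int) (k : Int × Int) (ys : List Int) (hpw : ys.Pairwise (· < ·)) :
    ∀ r ∈ pvSplit c k ys, r.1 = k.1 ∧ r.2.2.1 = k.2 := by
  cases ys with
  | nil => intro r hr; simp [pvSplit] at hr
  | cons y0 rest =>
    obtain ⟨hgt, hpw'⟩ := List.pairwise_cons.mp hpw
    intro r hr
    obtain ⟨a1, a2, -, -⟩ := (pvSplitGo_facts c k rest y0 y0 le_rfl hgt hpw').1 r hr
    exact ⟨a1, a2⟩

theorem pvRA_pairwise (c : Int) (es : List (Int × Int × Int × Int))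
    (hb : ∀ e ∈ es, e.2.1 ≤ e.2.2.1)
    (hp : es.Pairwise (fun e1 e2 => e1.2.2.2 < e2.2.2.2 ∨ (e1.2.2.2 = e2.2.2.2 ∧ e1.2.2.1 < e2.2.1))) :
    (pvRA c es).Pairwise (fun a b => pvKeyA a < pvKeyA b) := by
  unfold pvRA
  refine List.pairwise_flatMap.mpr ⟨?_, ?_⟩
  · intro k hk
    have hys := pvYs_pairwise c es k hb hp
    cases hys0 : pvYs c es k with
    | nil => simp [pvSplit]
    | cons y0 rest =>
      rw [hys0] at hys
      obtain ⟨hgt, hpw'⟩ := List.pairwise_cons.mp hys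
      obtain ⟨hmem, hpw2⟩ := pvSplitGo_facts c k rest y0 y0 le_rfl hgt hpw'
      have hgo : pvSplit c k (y0 :: rest) = pvSplitGo c k y0 y0 rest := rfl
      rw [hgo]
      refine List.Pairwise.imp_of_mem ?_ hpw2
      intro r1 r2 h1 h2 hlt
      obtain ⟨a1, a2, -, -⟩ := hmem r1 h1
      obtain ⟨b1, b2, -, -⟩ := hmem r2 h2
      show pvKeyA r1 < pvKeyA r2
      unfold pvKeyA
      rw [a1, a2, b1, b2]
      exact Prod.Lex.toLex_lt_toLex.mpr (Or.inr ⟨rfl, Prod.Lex.toLex_lt_toLex.mpr (Or.inr ⟨rfl, hlt⟩)⟩)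
  · have hknodup : (pvKs c es).Nodup :=
      ((PySem.List.sorted_perm _ _ _).nodup_iff).mpr (PySem.Set.nodup_ofList _)
    have h1 : (pvKs c es).Pairwise (fun a b => toLex a ≤ toLex b) := by
      unfold pvKs; exact PySem.List.sorted_pairwise _ _
    have h2 : (pvKs c es).Pairwise (fun a b => a ≠ b) := hknodup
    have hkpw : (pvKs c es).Pairwise (fun a b => toLex a < toLex b) := by
      refine (List.Pairwise.and h1 h2).imp ?_
      rintro a b ⟨hle, hne2⟩
      exact lt_of_le_of_ne hle (fun hEq => hne2 (toLex.injective hEq))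
    refine List.Pairwise.imp_of_mem ?_ hkpw
    intro k1 k2 hk1 hk2 hlt r1 hr1 r2 hr2
    obtain ⟨a1, a2⟩ := pvSplit_shape c k1 (pvYs c es k1) (pvYs_pairwise c es k1 hb hp) r1 hr1
    obtain ⟨b1, b2⟩ := pvSplit_shape c k2 (pvYs c es k2) (pvYs_pairwise c es k2 hb hp) r2 hr2
    show pvKeyA r1 < pvKeyA r2
    unfold pvKeyA
    rw [a1, a2, b1, b2]
    rcases Prod.Lex.toLex_lt_toLex.mp hlt with h | ⟨heq, h3⟩
    · exact Prod.Lex.toLex_lt_toLex.mpr (Or.inl h)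
    · exact Prod.Lex.toLex_lt_toLex.mpr (Or.inr ⟨heq, Prod.Lex.toLex_lt_toLex.mpr (Or.inl h3)⟩)


-- ---------- A's per-colour step ----------

theorem pvStepA (es : List (Int × Int × Int × Int)) (c : Int)
    (acts : List (Int × Int × Int × Int × Int))
    (hb : ∀ e ∈ es, e.2.1 ≤ e.2.2.1)
    (hp : es.Pairwise (fun e1 e2 => e1.2.2.2 < e2.2.2.2 ∨ (e1.2.2.2 = e2.2.2.2 ∧ e1.2.2.1 < e2.2.1))) :
    pvFlush ((PySem.List.sorted ((es.filter (fun e => e.1 == c)).map pvRunOf) pvKeyA false).foldl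
      (pvMergeStep c) (acts, none))
    = acts ++ pvRA c es := by
  have hmemks : ∀ p : Int × Int, p ∈ pvKs c es ↔ (c, p.1, p.2) ∈ es.map pvKey3 := by
    intro p
    rw [pvKs_mem]
    constructor
    · rintro ⟨y, hy⟩
      exact List.mem_map.mpr ⟨(c, p.1, p.2, y), hy, rfl⟩
    · intro hm
      obtain ⟨e, he, hke⟩ := List.mem_map.mp hm
      refine ⟨e.2.2.2, ?_⟩
      obtain ⟨e1, e2, e3, e4⟩ := e
      simp only [pvKey3, Prod.mk.injEq] at hke
      obtain ⟨h1, h2, h3⟩ := hke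
      rw [← h1, ← h2, ← h3]
      exact he
  have hksnodup : (pvKs c es).Nodup :=
    ((PySem.List.sorted_perm _ _ _).nodup_iff).mpr (PySem.Set.nodup_ofList _)
  set ks := pvKs c es with hks
  have hkpw : ks.Pairwise (fun a b => toLex a < toLex b) := by
    have h1 : ks.Pairwise (fun a b => toLex a ≤ toLex b) := by
      rw [hks]; unfold pvKs; exact PySem.List.sorted_pairwise _ _
    have h2 : ks.Pairwise (fun a b => a ≠ b) := hksnodup
    refine (List.Pairwise.and h1 h2).imp ?_
    rintro a b ⟨hle, hne2⟩
    exact lt_of_le_of_ne hle (fun hEq => hne2 (toLex.injective hEq))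
  have hcov : ∀ e ∈ es.filter (fun e => e.1 == c), (e.2.1, e.2.2.1) ∈ ks := by
    intro e he
    have hm := List.mem_filter.mp he
    have hc : e.1 = c := by simpa using hm.2
    refine (hmemks (e.2.1, e.2.2.1)).mpr ?_
    exact List.mem_map.mpr ⟨e, hm.1, by simp [pvKey3, hc]⟩
  have hne : ∀ k ∈ ks, ((es.filter (fun e => pvKey3 e == (c, k.1, k.2))).map (fun e => e.2.2.2)) ≠ [] := by
    intro k hkmem
    obtain ⟨e, hee, hpe⟩ := List.mem_map.mp ((hmemks k).mp hkmem)
    refine List.ne_nil_of_mem (a := e.2.2.2) ?_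
    exact List.mem_map.mpr ⟨e, List.mem_filter.mpr ⟨hee, by simp [hpe]⟩, rfl⟩
  have hgrp : ∀ k ∈ ks,
      ((es.filter (fun e => pvKey3 e == (c, k.1, k.2))).map (fun e => e.2.2.2)).map
        (fun y => (k.1, y, k.2, y, c))
      = ((es.filter (fun e => e.1 == c)).filter (fun e => (e.2.1, e.2.2.1) == k)).map pvRunOf := by
    intro k _
    rw [List.map_map, List.filter_filter]
    have hpred : ∀ e ∈ es, (pvKey3 e == (c, k.1, k.2)) = (((e.2.1, e.2.2.1) == k) && (e.1 == c)) := by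
      intro e _
      refine Bool.coe_iff_coe.mp ?_
      simp only [pvKey3, beq_iff_eq, Bool.and_eq_true, Prod.ext_iff]
      tauto
    rw [← List.filter_congr hpred]
    refine List.map_congr_left ?_
    intro e he
    have hm := (List.mem_filter.mp he).2
    have h1 : e.1 = c ∧ e.2.1 = k.1 ∧ e.2.2.1 = k.2 := by
      simpa [pvKey3, Prod.ext_iff, and_assoc] using hm
    simp [pvRunOf, h1.1, h1.2.1, h1.2.2]
  have hsorted : PySem.List.sorted ((es.filter (fun e => e.1 == c)).map pvRunOf) pvKeyA false
      = ks.flatMap (fun k =>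
          ((es.filter (fun e => pvKey3 e == (c, k.1, k.2))).map (fun e => e.2.2.2)).map
            (fun y => (k.1, y, k.2, y, c))) := by
    refine PySem.List.sorted_eq_of_perm_of_pairwise_lt _ _ pvKeyA ?_ ?_
    · rw [List.flatMap_congr hgrp, ← List.map_flatMap]
      exact List.Perm.map pvRunOf
        (pvPermFlatMapFilter (fun e => (e.2.1, e.2.2.1)) ks (es.filter (fun e => e.1 == c))
          hksnodup hcov)
    · refine List.pairwise_flatMap.mpr ⟨?_, ?_⟩
      · intro k _
        rw [List.map_map, List.pairwise_map]
        have hfp := List.Pairwise.filter (fun e => pvKey3 e == (c, k.1, k.2)) hp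
        refine List.Pairwise.imp_of_mem ?_ hfp
        intro e1 e2 he1 he2 hR
        have hm1 := List.mem_filter.mp he1
        have hm2 := List.mem_filter.mp he2
        obtain ⟨hc1, hx11, hx12⟩ : e1.1 = c ∧ e1.2.1 = k.1 ∧ e1.2.2.1 = k.2 := by
          simpa [pvKey3, Prod.ext_iff] using hm1.2
        obtain ⟨hc2, hx21, hx22⟩ : e2.1 = c ∧ e2.2.1 = k.1 ∧ e2.2.2.1 = k.2 := by
          simpa [pvKey3, Prod.ext_iff] using hm2.2
        have hb1 := hb e1 hm1.1
        have hb2 := hb e2 hm2.1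
        have hy : e1.2.2.2 < e2.2.2.2 := by
          rcases hR with h | ⟨heq, hlt⟩
          · exact h
          · exfalso; omega
        show pvKeyA (k.1, e1.2.2.2, k.2, e1.2.2.2, c) < pvKeyA (k.1, e2.2.2.2, k.2, e2.2.2.2, c)
        dsimp only [pvKeyA]
        exact Prod.Lex.toLex_lt_toLex.mpr (Or.inr ⟨rfl,
          Prod.Lex.toLex_lt_toLex.mpr (Or.inr ⟨rfl, hy⟩)⟩)
      · refine List.Pairwise.imp_of_mem ?_ hkpw
        intro k1 k2 _ _ hlt r1 hr1 r2 hr2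
        obtain ⟨y1, _, hr1e⟩ := List.mem_map.mp hr1
        obtain ⟨y2, _, hr2e⟩ := List.mem_map.mp hr2
        rw [← hr1e, ← hr2e]
        dsimp only [pvKeyA]
        rcases Prod.Lex.toLex_lt_toLex.mp hlt with h | ⟨heq, h2⟩
        · exact Prod.Lex.toLex_lt_toLex.mpr (Or.inl h)
        · exact Prod.Lex.toLex_lt_toLex.mpr
            (Or.inr ⟨heq, Prod.Lex.toLex_lt_toLex.mpr (Or.inl h2)⟩)
  rw [hsorted,
    pvMergeChain c (fun k => (es.filter (fun e => pvKey3 e == (c, k.1, k.2))).map (fun e => e.2.2.2))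
      ks acts hksnodup hne,
    pvFoldBGroup]
  rfl

-- ---------- B-side rectangle list: membership, nodup, fold form ----------

theorem pvRA_nodup (c : Int) (es : List (Int × Int × Int × Int))
    (hb : ∀ e ∈ es, e.2.1 ≤ e.2.2.1)
    (hp : es.Pairwise (fun e1 e2 => e1.2.2.2 < e2.2.2.2 ∨ (e1.2.2.2 = e2.2.2.2 ∧ e1.2.2.1 < e2.2.1))) :
    (pvRA c es).Nodup := by
  have h := pvRA_pairwise c es hb hp
  exact h.imp (fun hlt heq => absurd (heq ▸ hlt) (lt_irrefl _))

theorem pvRB_mem (target : List (List Int)) (h w c : Int) (r : Int × Int × Int × Int × Int) :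
    r ∈ pvRB target h w c ↔
      ∃ x1 a x2 b, r = (x1, a, x2, b, c) ∧ pvRectP target h w c x1 a x2 b := by
  unfold pvRB
  rw [List.mem_flatMap]
  constructor
  · rintro ⟨y, hy, hr⟩
    obtain ⟨hy0, hyh⟩ := PySem.List.mem_pyRange_one.mp hy
    obtain ⟨x1, x2, -, hm, hir, hre⟩ := (pvRowScanB_mem target h w c
      (PySem.List.pyGetD target y []) y w.toNat 0 le_rfl (by omega) (Or.inl rfl) r).mp hr
    obtain ⟨hx1, h12, h2w, -, -, -⟩ := id hm
    obtain ⟨g1, g2, g3⟩ := pvGrow_props target h w x1 x2 c hx1 h12 h2w h.toNat y (by omega)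
    have hruny : pvRun target h w c x1 x2 y := ⟨hy0, hyh, hm⟩
    refine ⟨x1, y, x2, pvGrow target h w x1 x2 c y h.toNat, hre, g1, ?_, ?_, g3⟩
    · intro t h1 h2
      rcases eq_or_lt_of_le h1 with hh | hh
      · rw [← hh]; exact hruny
      · exact g2 t hh h2
    · intro hcon
      have := (pvIsRunB_iff target h w (y - 1) x1 x2 c hx1 h12 h2w).mpr hcon
      rw [hir] at this
      exact absurd this (by simp)
  · rintro ⟨x1, a, x2, b, hre, hab, hint, hna, hnb⟩
    have hruna : pvRun target h w c x1 x2 a := hint a le_rfl hab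
    obtain ⟨ha0, hah, hm⟩ := hruna
    obtain ⟨hx1, h12, h2w, -, -, -⟩ := id hm
    refine ⟨a, PySem.List.mem_pyRange_one.mpr ⟨ha0, hah⟩, ?_⟩
    refine (pvRowScanB_mem target h w c (PySem.List.pyGetD target a []) a w.toNat 0 le_rfl
      (by omega) (Or.inl rfl) r).mpr ⟨x1, x2, hx1, hm, ?_, ?_⟩
    · have hni : ¬ (pvIsRunB target h w (a - 1) x1 x2 c = true) := fun hcon =>
        hna ((pvIsRunB_iff target h w (a - 1) x1 x2 c hx1 h12 h2w).mp hcon)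
      simpa using hni
    · obtain ⟨g1, g2, g3⟩ := pvGrow_props target h w x1 x2 c hx1 h12 h2w h.toNat a (by omega)
      have hgb : pvGrow target h w x1 x2 c a h.toNat = b := by
        by_contra hne
        rcases lt_or_gt_of_ne hne with hlt | hgt
        · exact g3 (hint (pvGrow target h w x1 x2 c a h.toNat + 1) (by omega) (by omega))
        · exact hnb (g2 (b + 1) (by omega) (by omega))
      rw [hre, hgb]

theorem pvRB_nodup (target : List (List Int)) (h w c : Int) : (pvRB target h w c).Nodup := by
  have hpw : (pvRB target h w c).Pairwise
      (fun a b => a.2.1 < b.2.1 ∨ (a.2.1 = b.2.1 ∧ a.1 < b.1)) := by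
    unfold pvRB
    refine List.pairwise_flatMap.mpr ⟨?_, ?_⟩
    · intro y hy
      obtain ⟨hmem, hpw2⟩ := pvRowScanB_facts target h w c (PySem.List.pyGetD target y []) y w.toNat 0
      refine List.Pairwise.imp_of_mem ?_ hpw2
      intro a b ha hbm hlt
      right
      exact ⟨by rw [(hmem a ha).2, (hmem b hbm).2], hlt⟩
    · refine List.Pairwise.imp_of_mem ?_ (PySem.List.pairwise_lt_pyRange_one (a := 0) (b := h))
      intro y1 y2 hy1 hy2 hlt a ha b hbm
      left
      rw [((pvRowScanB_facts target h w c (PySem.List.pyGetD target y1 []) y1 w.toNat 0).1 a ha).2,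
          ((pvRowScanB_facts target h w c (PySem.List.pyGetD target y2 []) y2 w.toNat 0).1 b hbm).2]
      exact hlt
  exact hpw.imp (fun hR heq => by
    subst heq
    rcases hR with hh | ⟨-, hh⟩ <;> exact absurd hh (lt_irrefl _))

theorem pvRB_eq (target : List (List Int)) (h w c : Int) :
    (PySem.List.pyRange 0 h 1).foldl (fun r y =>
      pvRowScanB target h w c (PySem.List.pyGetD target y []) y 0 w.toNat r) []
    = pvRB target h w c := by
  have key : ∀ (l : List Int) (init : List (Int × Int × Int × Int × Int)),
      l.foldl (fun r y => pvRowScanB target h w c (PySem.List.pyGetD target y []) y 0 w.toNat r) init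
      = init ++ l.flatMap (fun y =>
          pvRowScanB target h w c (PySem.List.pyGetD target y []) y 0 w.toNat []) := by
    intro l
    induction l with
    | nil => intro init; simp
    | cons a l ih =>
      intro init
      rw [List.foldl_cons, pvRowScanB_acc, ih, List.flatMap_cons, List.append_assoc]
  simpa [pvRB] using key (PySem.List.pyRange 0 h 1) []

-- ---------- the per-colour equality and the verdict ----------

theorem pvPerColorEq (target : List (List Int)) (base c : Int)
    (acts : List (Int × Int × Int × Int × Int)) :
    pvFlush ((PySem.List.sorted
        (((pvEvents base ((PySem.List.pyGetD target 0 []).length : Int) (PySem.List.enumerate target)).filter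
            (fun e => e.1 == c)).map pvRunOf) pvKeyA false).foldl (pvMergeStep c) (acts, none))
    = acts ++ PySem.List.sorted
        (if c != base then pvRB target target.length ((PySem.List.pyGetD target 0 []).length : Int) c else [])
        pvKeyA false := by
  obtain ⟨hb, hp⟩ := pvEvents_facts base ((PySem.List.pyGetD target 0 []).length : Int)
    (PySem.List.enumerate target) (PySem.List.pairwise_lt_enumerate _ _)
  rw [pvStepA _ c acts hb hp]
  congr 1
  by_cases hcb : c = base
  · have hfil : ((pvEvents base ((PySem.List.pyGetD target 0 []).length : Int)
        (PySem.List.enumerate target)).filter (fun e => e.1 == c)) = [] := by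
      rw [List.filter_eq_nil_iff]
      intro e he hbe
      have he1 : e.1 = c := by simpa using hbe
      have hmem := (pvE_mem target base ((PySem.List.pyGetD target 0 []).length : Int)
        e.1 e.2.1 e.2.2.1 e.2.2.2).mp he
      exact hmem.1 (he1.trans hcb)
    have hra : pvRA c (pvEvents base ((PySem.List.pyGetD target 0 []).length : Int)
        (PySem.List.enumerate target)) = [] := by
      unfold pvRA pvKs
      rw [hfil]
      rfl
    rw [hra, if_neg (by simp [hcb])]
    rfl
  · rw [if_pos (by simpa using hcb)]
    have hperm : (pvRA c (pvEvents base ((PySem.List.pyGetD target 0 []).length : Int)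
          (PySem.List.enumerate target))).Perm
        (pvRB target (target.length : Int) ((PySem.List.pyGetD target 0 []).length : Int) c) := by
      rw [List.perm_ext_iff_of_nodup (pvRA_nodup c _ hb hp) (pvRB_nodup target _ _ c)]
      intro r
      rw [pvRA_mem c _ hb hp r, pvRB_mem target _ _ c r]
      constructor
      · rintro ⟨x1, a, x2, b, hr, hab, hint, hna, hnb⟩
        refine ⟨x1, a, x2, b, hr, hab, ?_, ?_, ?_⟩
        · intro t h1 h2
          exact ((pvE_mem target base _ c x1 x2 t).mp (hint t h1 h2)).2
        · intro hcon
          exact hna ((pvE_mem target base _ c x1 x2 (a - 1)).mpr ⟨hcb, hcon⟩)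
        · intro hcon
          exact hnb ((pvE_mem target base _ c x1 x2 (b + 1)).mpr ⟨hcb, hcon⟩)
      · rintro ⟨x1, a, x2, b, hr, hab, hint, hna, hnb⟩
        refine ⟨x1, a, x2, b, hr, hab, ?_, ?_, ?_⟩
        · intro t h1 h2
          exact (pvE_mem target base _ c x1 x2 t).mpr ⟨hcb, hint t h1 h2⟩
        · intro hcon
          exact hna ((pvE_mem target base _ c x1 x2 (a - 1)).mp hcon).2
        · intro hcon
          exact hnb ((pvE_mem target base _ c x1 x2 (b + 1)).mp hcon).2
    exact (PySem.List.sorted_eq_of_perm_of_pairwise_lt _ _ pvKeyA hperm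
      (pvRA_pairwise c _ hb hp)).symm




-- ===== VERDICT (by name: the statement is the Claim_ definition above) =====
theorem build_greedy_initial_solution_spec : Claim_equal_build_greedy_initial_solution := by
  intro target base_color color_order _ _
  unfold Spec_build_greedy_initial_solution
  unfold build_greedy_initial_solution build_greedy_initial_solution_alt
  simp only [pvGridA]
  refine PySem.List.foldl_congr_mem _ _ _ _ ?_
  intro acts c _
  rw [pvGetA, pvRB_eq]
  exact pvPerColorEq target base_color c acts
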